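-- pv_equiv track=rewrite | github.com/henrycgbaker/llenergymeasure | scripts/probe_yaml_proposal_quality.py | guess_native_type
-- ===== SOURCE A (Python) =====
-- def guess_native_type(engine: str, fields: list[str]) -> str:
--     """Best-effort native-type guess from engine + observed fields."""
--     if engine == "transformers":
--         if any(f in {"temperature", "top_p", "top_k", "do_sample", "num_beams"} for f in fields):
--             return "transformers.GenerationConfig"
--         return "transformers.AutoModel"  # placeholder
--     if engine == "vllm":
--         if any(f in {"temperature", "top_p", "top_k", "presence_penalty"} for f in fields):
--             return "vllm.SamplingParams"
--         if any(
--             f in {"max_num_batched_tokens", "max_model_len", "tensor_parallel_size"} for f in fields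
--         ):
--             return "vllm.LlmArgs"
--         return "vllm.LLM"
--     return f"{engine}.UnknownNativeType"
-- ===== SOURCE B (Python) =====
-- # Inverted index: map each trigger field directly to its native type, collect the
-- # set of types hit by the observed fields in one pass, then resolve by priority.
-- ENGINE_INFO = {
--     "transformers": (
--         {f: "transformers.GenerationConfig"
--          for f in ("temperature", "top_p", "top_k", "do_sample", "num_beams")},
--         ["transformers.GenerationConfig"],
--         "transformers.AutoModel",
--     ),
--     "vllm": (
--         {**{f: "vllm.SamplingParams"
--             for f in ("temperature", "top_p", "top_k", "presence_penalty")},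
--          **{f: "vllm.LlmArgs"
--             for f in ("max_num_batched_tokens", "max_model_len", "tensor_parallel_size")}},
--         ["vllm.SamplingParams", "vllm.LlmArgs"],
--         "vllm.LLM",
--     ),
-- }
--
--
-- def guess_native_type(engine: str, fields: list[str]) -> str:
--     """Best-effort native-type guess from engine + observed fields."""
--     info = ENGINE_INFO.get(engine)
--     if info is None:
--         return f"{engine}.UnknownNativeType"
--     table, priority, default = info
--     hits = {table[f] for f in fields if f in table}
--     for t in priority:
--         if t in hits:
--             return t
--     return default
-- ===== Notes on version B (the rewrite author's own statement) =====
-- stated objective: alternative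
-- what changed: Replaces A's per-rule any-over-trigger-set scans with an inverted index (field -> native type): one pass over fields collects the set of hit types via dict lookups, then a priority list picks the first hit type, else the engine default.
import Mathlib
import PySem

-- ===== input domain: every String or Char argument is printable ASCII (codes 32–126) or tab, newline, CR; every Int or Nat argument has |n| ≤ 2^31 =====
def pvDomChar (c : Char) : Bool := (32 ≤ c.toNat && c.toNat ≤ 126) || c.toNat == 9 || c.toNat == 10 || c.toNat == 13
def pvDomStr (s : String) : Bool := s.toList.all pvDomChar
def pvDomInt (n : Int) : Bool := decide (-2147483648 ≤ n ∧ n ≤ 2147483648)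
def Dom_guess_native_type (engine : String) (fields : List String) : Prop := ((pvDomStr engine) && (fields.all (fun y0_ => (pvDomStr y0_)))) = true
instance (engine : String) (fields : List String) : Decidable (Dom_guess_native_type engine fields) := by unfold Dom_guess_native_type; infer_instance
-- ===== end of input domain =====

-- B replaces A's per-rule any-scans over trigger sets with an inverted index field -> native type: one pass collecting hit types, then priority resolution (objective: alternative).

-- ===== PORT A =====
def guess_native_type (engine : String) (fields : List String) : String :=
  if engine == "transformers" then
    if fields.any (fun f => (["temperature", "top_p", "top_k", "do_sample", "num_beams"] : PySem.Set String).contains f) then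
      "transformers.GenerationConfig"
    else
      "transformers.AutoModel"
  else if engine == "vllm" then
    if fields.any (fun f => (["temperature", "top_p", "top_k", "presence_penalty"] : PySem.Set String).contains f) then
      "vllm.SamplingParams"
    else if fields.any (fun f => (["max_num_batched_tokens", "max_model_len", "tensor_parallel_size"] : PySem.Set String).contains f) then
      "vllm.LlmArgs"
    else
      "vllm.LLM"
  else
    engine ++ ".UnknownNativeType"

-- ===== PORT B =====
-- ENGINE_INFO of Source B: engine -> (inverted index field -> native type, priority list, default)
def pvInfo : PySem.Dict String (PySem.Dict String String × List String × String) :=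
  PySem.Dict.ofList
  [("transformers",
     (PySem.Dict.ofList
        [("temperature", "transformers.GenerationConfig"),
         ("top_p", "transformers.GenerationConfig"),
         ("top_k", "transformers.GenerationConfig"),
         ("do_sample", "transformers.GenerationConfig"),
         ("num_beams", "transformers.GenerationConfig")],
      ["transformers.GenerationConfig"],
      "transformers.AutoModel")),
   ("vllm",
     (PySem.Dict.ofList
        [("temperature", "vllm.SamplingParams"),
         ("top_p", "vllm.SamplingParams"),
         ("top_k", "vllm.SamplingParams"),
         ("presence_penalty", "vllm.SamplingParams"),
         ("max_num_batched_tokens", "vllm.LlmArgs"),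
         ("max_model_len", "vllm.LlmArgs"),
         ("tensor_parallel_size", "vllm.LlmArgs")],
      ["vllm.SamplingParams", "vllm.LlmArgs"],
      "vllm.LLM"))]

-- 'hits = {table[f] for f in fields if f in table}' of Source B (a set comprehension over the list fields)
def pvHits (table : PySem.Dict String String) (fields : List String) : PySem.Set String :=
  fields.foldl
    (fun s f => match PySem.Dict.get? table f with
                | some t => PySem.Set.add s t
                | none => s)
    PySem.Set.empty

-- 'for t in priority: if t in hits: return t / return default' of Source B
def pvFirstHit (priority : List String) (hits : PySem.Set String) (default : String) : String :=
  match priority with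
  | [] => default
  | t :: rest => if PySem.Set.contains hits t then t else pvFirstHit rest hits default

def guess_native_type_alt (engine : String) (fields : List String) : String :=
  match PySem.Dict.get? pvInfo engine with
  | none => engine ++ ".UnknownNativeType"
  | some (table, priority, default) => pvFirstHit priority (pvHits table fields) default

-- ===== PRECONDITION & SPEC =====
def Spec_guess_native_type (engine : String) (fields : List String) (out : String) : Prop := out = guess_native_type_alt engine fields
instance (engine : String) (fields : List String) (out : String) : Decidable (Spec_guess_native_type engine fields out) := by unfold Spec_guess_native_type; infer_instance

-- ===== CLAIM =====
def Claim_equal_guess_native_type : Prop := ∀ (engine : String) (fields : List String), Dom_guess_native_type engine fields → Spec_guess_native_type engine fields (guess_native_type engine fields)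

-- ===== LEMMAS AND PROOFS =====

-- membership in the hits fold
theorem mem_pvHits_gen (table : PySem.Dict String String) (fields : List String)
    (s : PySem.Set String) (t : String) :
    t ∈ fields.foldl
      (fun s f => match PySem.Dict.get? table f with
                  | some v => PySem.Set.add s v
                  | none => s) s
    ↔ t ∈ s ∨ ∃ f ∈ fields, PySem.Dict.get? table f = some t := by
  induction fields generalizing s with
  | nil => simp
  | cons f rest ih =>
    simp only [List.foldl_cons, ih]
    cases h : PySem.Dict.get? table f with
    | none =>
      constructor
      · rintro (hs | ⟨g, hg, hgt⟩)
        · exact Or.inl hs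
        · exact Or.inr ⟨g, List.mem_cons_of_mem _ hg, hgt⟩
      · rintro (hs | ⟨g, hg, hgt⟩)
        · exact Or.inl hs
        · rcases List.mem_cons.mp hg with rfl | hg'
          · rw [h] at hgt; cases hgt
          · exact Or.inr ⟨g, hg', hgt⟩
    | some v =>
      rw [PySem.Set.mem_add]
      constructor
      · rintro ((hs | rfl) | ⟨g, hg, hgt⟩)
        · exact Or.inl hs
        · exact Or.inr ⟨f, List.mem_cons_self, h⟩
        · exact Or.inr ⟨g, List.mem_cons_of_mem _ hg, hgt⟩
      · rintro (hs | ⟨g, hg, hgt⟩)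
        · exact Or.inl (Or.inl hs)
        · rcases List.mem_cons.mp hg with rfl | hg'
          · rw [h] at hgt; exact Or.inl (Or.inr (Option.some.inj hgt).symm)
          · exact Or.inr ⟨g, hg', hgt⟩

theorem contains_pvHits (table : PySem.Dict String String) (fields : List String) (t : String) :
    PySem.Set.contains (pvHits table fields) t
      = fields.any (fun f => PySem.Dict.get? table f == some t) := by
  have h : PySem.Set.contains (pvHits table fields) t = true
      ↔ fields.any (fun f => PySem.Dict.get? table f == some t) = true := by
    rw [PySem.Set.contains_iff]
    unfold pvHits
    rw [mem_pvHits_gen]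
    simp [List.any_eq_true]
  cases hA : PySem.Set.contains (pvHits table fields) t <;>
    cases hB : fields.any (fun f => PySem.Dict.get? table f == some t) <;> simp_all

-- pointwise: the inverted-index lookups agree with A's trigger-set membership tests
theorem tbl_transformers (f : String) :
    (PySem.Dict.get? (PySem.Dict.ofList
        [("temperature", "transformers.GenerationConfig"),
         ("top_p", "transformers.GenerationConfig"),
         ("top_k", "transformers.GenerationConfig"),
         ("do_sample", "transformers.GenerationConfig"),
         ("num_beams", "transformers.GenerationConfig")]) f
        == some "transformers.GenerationConfig")
    = (["temperature", "top_p", "top_k", "do_sample", "num_beams"] : PySem.Set String).contains f := by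
  rw [show (PySem.Dict.ofList
        [("temperature", "transformers.GenerationConfig"),
         ("top_p", "transformers.GenerationConfig"),
         ("top_k", "transformers.GenerationConfig"),
         ("do_sample", "transformers.GenerationConfig"),
         ("num_beams", "transformers.GenerationConfig")]) = PySem.Dict.mk
        [("temperature", "transformers.GenerationConfig"),
         ("top_p", "transformers.GenerationConfig"),
         ("top_k", "transformers.GenerationConfig"),
         ("do_sample", "transformers.GenerationConfig"),
         ("num_beams", "transformers.GenerationConfig")] from by decide]
  simp only [PySem.Dict.get?_mk_cons]
  split_ifs with h1 h2 h3 h4 h5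
  · rw [show f = "temperature" from (beq_iff_eq.mp h1).symm]; decide
  · rw [show f = "top_p" from (beq_iff_eq.mp h2).symm]; decide
  · rw [show f = "top_k" from (beq_iff_eq.mp h3).symm]; decide
  · rw [show f = "do_sample" from (beq_iff_eq.mp h4).symm]; decide
  · rw [show f = "num_beams" from (beq_iff_eq.mp h5).symm]; decide
  · 
    have n1 : f ≠ "temperature" := fun h => h1 (by simp [h])
    have n2 : f ≠ "top_p" := fun h => h2 (by simp [h])
    have n3 : f ≠ "top_k" := fun h => h3 (by simp [h])
    have n4 : f ≠ "do_sample" := fun h => h4 (by simp [h])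
    have n5 : f ≠ "num_beams" := fun h => h5 (by simp [h])
    simp [PySem.Dict.get?, n1, n2, n3, n4, n5]

theorem tbl_vllm_sampling (f : String) :
    (PySem.Dict.get? (PySem.Dict.ofList
        [("temperature", "vllm.SamplingParams"),
         ("top_p", "vllm.SamplingParams"),
         ("top_k", "vllm.SamplingParams"),
         ("presence_penalty", "vllm.SamplingParams"),
         ("max_num_batched_tokens", "vllm.LlmArgs"),
         ("max_model_len", "vllm.LlmArgs"),
         ("tensor_parallel_size", "vllm.LlmArgs")]) f
        == some "vllm.SamplingParams")
    = (["temperature", "top_p", "top_k", "presence_penalty"] : PySem.Set String).contains f := by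
  rw [show (PySem.Dict.ofList
        [("temperature", "vllm.SamplingParams"),
         ("top_p", "vllm.SamplingParams"),
         ("top_k", "vllm.SamplingParams"),
         ("presence_penalty", "vllm.SamplingParams"),
         ("max_num_batched_tokens", "vllm.LlmArgs"),
         ("max_model_len", "vllm.LlmArgs"),
         ("tensor_parallel_size", "vllm.LlmArgs")]) = PySem.Dict.mk
        [("temperature", "vllm.SamplingParams"),
         ("top_p", "vllm.SamplingParams"),
         ("top_k", "vllm.SamplingParams"),
         ("presence_penalty", "vllm.SamplingParams"),
         ("max_num_batched_tokens", "vllm.LlmArgs"),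
         ("max_model_len", "vllm.LlmArgs"),
         ("tensor_parallel_size", "vllm.LlmArgs")] from by decide]
  simp only [PySem.Dict.get?_mk_cons]
  split_ifs with h1 h2 h3 h4 h5 h6 h7
  · rw [show f = "temperature" from (beq_iff_eq.mp h1).symm]; decide
  · rw [show f = "top_p" from (beq_iff_eq.mp h2).symm]; decide
  · rw [show f = "top_k" from (beq_iff_eq.mp h3).symm]; decide
  · rw [show f = "presence_penalty" from (beq_iff_eq.mp h4).symm]; decide
  · rw [show f = "max_num_batched_tokens" from (beq_iff_eq.mp h5).symm]; decide
  · rw [show f = "max_model_len" from (beq_iff_eq.mp h6).symm]; decide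
  · rw [show f = "tensor_parallel_size" from (beq_iff_eq.mp h7).symm]; decide
  · 
    have n1 : f ≠ "temperature" := fun h => h1 (by simp [h])
    have n2 : f ≠ "top_p" := fun h => h2 (by simp [h])
    have n3 : f ≠ "top_k" := fun h => h3 (by simp [h])
    have n4 : f ≠ "presence_penalty" := fun h => h4 (by simp [h])
    have n5 : f ≠ "max_num_batched_tokens" := fun h => h5 (by simp [h])
    have n6 : f ≠ "max_model_len" := fun h => h6 (by simp [h])
    have n7 : f ≠ "tensor_parallel_size" := fun h => h7 (by simp [h])
    simp [PySem.Dict.get?, n1, n2, n3, n4]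

theorem tbl_vllm_args (f : String) :
    (PySem.Dict.get? (PySem.Dict.ofList
        [("temperature", "vllm.SamplingParams"),
         ("top_p", "vllm.SamplingParams"),
         ("top_k", "vllm.SamplingParams"),
         ("presence_penalty", "vllm.SamplingParams"),
         ("max_num_batched_tokens", "vllm.LlmArgs"),
         ("max_model_len", "vllm.LlmArgs"),
         ("tensor_parallel_size", "vllm.LlmArgs")]) f
        == some "vllm.LlmArgs")
    = (["max_num_batched_tokens", "max_model_len", "tensor_parallel_size"] : PySem.Set String).contains f := by
  rw [show (PySem.Dict.ofList
        [("temperature", "vllm.SamplingParams"),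
         ("top_p", "vllm.SamplingParams"),
         ("top_k", "vllm.SamplingParams"),
         ("presence_penalty", "vllm.SamplingParams"),
         ("max_num_batched_tokens", "vllm.LlmArgs"),
         ("max_model_len", "vllm.LlmArgs"),
         ("tensor_parallel_size", "vllm.LlmArgs")]) = PySem.Dict.mk
        [("temperature", "vllm.SamplingParams"),
         ("top_p", "vllm.SamplingParams"),
         ("top_k", "vllm.SamplingParams"),
         ("presence_penalty", "vllm.SamplingParams"),
         ("max_num_batched_tokens", "vllm.LlmArgs"),
         ("max_model_len", "vllm.LlmArgs"),
         ("tensor_parallel_size", "vllm.LlmArgs")] from by decide]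
  simp only [PySem.Dict.get?_mk_cons]
  split_ifs with h1 h2 h3 h4 h5 h6 h7
  · rw [show f = "temperature" from (beq_iff_eq.mp h1).symm]; decide
  · rw [show f = "top_p" from (beq_iff_eq.mp h2).symm]; decide
  · rw [show f = "top_k" from (beq_iff_eq.mp h3).symm]; decide
  · rw [show f = "presence_penalty" from (beq_iff_eq.mp h4).symm]; decide
  · rw [show f = "max_num_batched_tokens" from (beq_iff_eq.mp h5).symm]; decide
  · rw [show f = "max_model_len" from (beq_iff_eq.mp h6).symm]; decide
  · rw [show f = "tensor_parallel_size" from (beq_iff_eq.mp h7).symm]; decide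
  · 
    have n1 : f ≠ "temperature" := fun h => h1 (by simp [h])
    have n2 : f ≠ "top_p" := fun h => h2 (by simp [h])
    have n3 : f ≠ "top_k" := fun h => h3 (by simp [h])
    have n4 : f ≠ "presence_penalty" := fun h => h4 (by simp [h])
    have n5 : f ≠ "max_num_batched_tokens" := fun h => h5 (by simp [h])
    have n6 : f ≠ "max_model_len" := fun h => h6 (by simp [h])
    have n7 : f ≠ "tensor_parallel_size" := fun h => h7 (by simp [h])
    simp [PySem.Dict.get?, n5, n6, n7]

theorem any_congr (fields : List String) (p q : String → Bool) (h : ∀ f, p f = q f) :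
    fields.any p = fields.any q := by
  induction fields with
  | nil => rfl
  | cons x xs ih => simp [List.any_cons, h, ih]

-- ===== VERDICT =====
theorem guess_native_type_spec : Claim_equal_guess_native_type := by
  intro engine fields _
  unfold Spec_guess_native_type guess_native_type guess_native_type_alt
  by_cases ht : engine = "transformers"
  · subst ht
    rw [show PySem.Dict.get? pvInfo "transformers" = some
        (PySem.Dict.ofList
          [("temperature", "transformers.GenerationConfig"),
           ("top_p", "transformers.GenerationConfig"),
           ("top_k", "transformers.GenerationConfig"),
           ("do_sample", "transformers.GenerationConfig"),
           ("num_beams", "transformers.GenerationConfig")],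
         ["transformers.GenerationConfig"],
         "transformers.AutoModel") from rfl]
    simp only [beq_self_eq_true, if_true, pvFirstHit, contains_pvHits]
    rw [any_congr fields _ _ tbl_transformers]
  · by_cases hv : engine = "vllm"
    · subst hv
      rw [show PySem.Dict.get? pvInfo "vllm" = some
          (PySem.Dict.ofList
            [("temperature", "vllm.SamplingParams"),
             ("top_p", "vllm.SamplingParams"),
             ("top_k", "vllm.SamplingParams"),
             ("presence_penalty", "vllm.SamplingParams"),
             ("max_num_batched_tokens", "vllm.LlmArgs"),
             ("max_model_len", "vllm.LlmArgs"),
             ("tensor_parallel_size", "vllm.LlmArgs")],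
           ["vllm.SamplingParams", "vllm.LlmArgs"],
           "vllm.LLM") from rfl]
      simp only [show (("vllm" : String) == "transformers") = false from rfl,
        beq_self_eq_true, if_true, Bool.false_eq_true, if_false, pvFirstHit, contains_pvHits]
      rw [any_congr fields _ _ tbl_vllm_sampling, any_congr fields _ _ tbl_vllm_args]
    · have h1 : (engine == "transformers") = false := by simp [ht]
      have h2 : (engine == "vllm") = false := by simp [hv]
      have hg : PySem.Dict.get? pvInfo engine = none := by
        rw [PySem.Dict.get?_eq_none_iff_not_mem_keys]
        rw [show pvInfo.keys = ["transformers", "vllm"] from by decide]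
        simp [ht, hv]
      rw [hg]
      simp [h1, h2]
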